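-- pv_equiv track=rewrite | github.com/KamilDemel/LeetCode-Grind | WDI_Fundamentals/fibonacci_target_finder.py | find_fibonacci_starting_pair
-- ===== SOURCE A (Python) =====
-- def find_fibonacci_starting_pair(target_year):
--     """
--     Finds the first pair of starting numbers (a, b) that eventually
--     generate the target_year in a Fibonacci-like sequence.
--     """
--     for total_sum in range(2, target_year):
--         for a in range(1, total_sum // 2 + 1):
--             b = total_sum - a
--
--             temp_a, temp_b = a, b
--
--             while temp_b <= target_year:
--                 if temp_b == target_year:
--                     return a, b
--
--                 temp_a, temp_b = temp_b, temp_b + temp_a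
--
--     return None
-- ===== SOURCE B (Python) =====
-- def find_fibonacci_starting_pair(target_year):
--     """
--     Same result as A: first (by total sum s, then by a) pair (a, b=s-a) whose
--     Fibonacci-like sequence hits target_year.  Instead of simulating the
--     sequence for every a, solve a*fib(j) = s*fib(j+2) - target_year over the
--     log-many Fibonacci indices j and take the smallest valid a per sum.
--     """
--     for s in range(2, target_year):
--         best = None
--         f0, f1, f2 = 1, 1, 2  # fib(1), fib(2), fib(3)
--         while f2 <= target_year:
--             num = s * f2 - target_year
--             if num >= f0 and num % f0 == 0:
--                 a = num // f0
--                 if a * 2 <= s and (best is None or a < best):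
--                     best = a
--             f0, f1, f2 = f1, f2, f1 + f2
--         if best is not None:
--             return best, s - best
--     return None
-- ===== Notes on version B (the rewrite author's own statement) =====
-- stated objective: faster
-- what changed: Instead of simulating the Fibonacci-like sequence for every candidate a (O(s) starts per sum, each O(log target) steps), B solves a*fib(j) = s*fib(j+2) - target over the O(log target) Fibonacci indices j per total sum s, keeping the smallest valid a.
import Mathlib
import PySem

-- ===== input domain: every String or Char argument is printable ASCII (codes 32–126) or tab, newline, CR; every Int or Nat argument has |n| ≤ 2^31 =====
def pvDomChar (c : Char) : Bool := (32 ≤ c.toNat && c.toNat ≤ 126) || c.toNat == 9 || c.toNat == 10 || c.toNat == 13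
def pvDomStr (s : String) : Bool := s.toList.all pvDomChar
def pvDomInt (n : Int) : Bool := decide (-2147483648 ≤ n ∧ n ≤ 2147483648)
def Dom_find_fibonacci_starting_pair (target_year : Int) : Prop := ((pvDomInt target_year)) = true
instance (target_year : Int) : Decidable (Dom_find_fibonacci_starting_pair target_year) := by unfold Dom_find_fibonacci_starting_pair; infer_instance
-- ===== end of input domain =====

-- B replaces A's per-a simulation of the Fibonacci-like sequence by solving
-- a * fib(j) = s * fib(j+2) - target over the Fibonacci indices j for each total sum s
-- (objective: faster).

-- ===== PORT A =====
-- the `while temp_b <= target_year` loop; fuel (target_year.toNat + 2) suffices because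
-- temp_b starts ≥ 1 and strictly increases (fibLoopA_complete / hit_k_bound below)
def fibLoopA (t : Int) : Nat → Int → Int → Bool
  | 0, _, _ => false
  | n+1, ta, tb =>
    if tb ≤ t then
      (if tb = t then true else fibLoopA t n tb (tb + ta))
    else false

-- the `for a in range(1, total_sum // 2 + 1)` loop with its early return
def innerA (t s : Int) : Option (List Int) :=
  (PySem.List.pyRange 1 (PySem.Int.floordiv s 2 + 1)).findSome?
    (fun a => if fibLoopA t (t.toNat + 2) a (s - a) then some [a, s - a] else none)

def find_fibonacci_starting_pair (target_year : Int) : Option (List Int) :=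
  (PySem.List.pyRange 2 target_year).findSome? (fun s => innerA target_year s)

-- ===== PORT B =====
-- the `while f2 <= target_year` loop over Fibonacci triples, keeping the least valid a;
-- `∀ b ∈ best, a < b` is Python's `best is None or a < best`; fuel (t.toNat + 2) suffices
-- because f2 strictly increases along the Fibonacci numbers
def bestLoopB (t s : Int) : Nat → Int → Int → Int → Option Int → Option Int
  | 0, _, _, _, best => best
  | n+1, f0, f1, f2, best =>
    if f2 ≤ t then
      let num := s * f2 - t
      let best' :=
        if num ≥ f0 ∧ PySem.Int.mod num f0 = 0 then
          let a := PySem.Int.floordiv num f0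
          if a * 2 ≤ s ∧ (∀ b ∈ best, a < b) then some a else best
        else best
      bestLoopB t s n f1 f2 (f1 + f2) best'
    else best

def innerB (t s : Int) : Option (List Int) :=
  match bestLoopB t s (t.toNat + 2) 1 1 2 none with
  | some a => some [a, s - a]
  | none => none

def find_fibonacci_starting_pair_alt (target_year : Int) : Option (List Int) :=
  (PySem.List.pyRange 2 target_year).findSome? (fun s => innerB target_year s)

-- ===== PRECONDITION & SPEC =====
def Spec_find_fibonacci_starting_pair (target_year : Int) (out : Option (List Int)) : Prop := out = find_fibonacci_starting_pair_alt target_year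
instance (target_year : Int) (out : Option (List Int)) : Decidable (Spec_find_fibonacci_starting_pair target_year out) := by unfold Spec_find_fibonacci_starting_pair; infer_instance

-- ===== CLAIM (what is proved, stated in full; the proofs are below) =====
def Claim_equal_find_fibonacci_starting_pair : Prop := ∀ (target_year : Int), Dom_find_fibonacci_starting_pair target_year → Spec_find_fibonacci_starting_pair target_year (find_fibonacci_starting_pair target_year)

-- ===== LEMMAS AND PROOFS =====

-- the pair (x, y) eventually generates t: some term x*fib k + y*fib (k+1) (k ≥ 0 giving y, x+y, x+2y, …) equals t
def Hit (t x y : Int) : Prop := ∃ k : Nat, x * (Nat.fib k : Int) + y * (Nat.fib (k+1) : Int) = t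

-- r is the minimum of {a | P a} (none iff the set is empty)
def IsMinOpt (r : Option Int) (P : Int → Prop) : Prop :=
  (r = none ∧ ∀ a, ¬ P a) ∨ (∃ a, r = some a ∧ P a ∧ ∀ a', P a' → a ≤ a')

lemma isMinOpt_congr {r : Option Int} {P Q : Int → Prop} (h : ∀ a, P a ↔ Q a) :
    IsMinOpt r P → IsMinOpt r Q := by
  rintro (⟨hr, hP⟩ | ⟨a, hr, ha, hmin⟩)
  · exact Or.inl ⟨hr, fun a hq => hP a ((h a).2 hq)⟩
  · exact Or.inr ⟨a, hr, (h a).1 ha, fun a' hq => hmin a' ((h a').2 hq)⟩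

lemma isMinOpt_unique {r r' : Option Int} {P : Int → Prop}
    (h : IsMinOpt r P) (h' : IsMinOpt r' P) : r = r' := by
  rcases h with ⟨hr, hP⟩ | ⟨a, hr, ha, hmin⟩
  · rcases h' with ⟨hr', _⟩ | ⟨a', hr', ha', _⟩
    · rw [hr, hr']
    · exact absurd ha' (hP a')
  · rcases h' with ⟨hr', hP'⟩ | ⟨a', hr', ha', hmin'⟩
    · exact absurd ha (hP' a)
    · rw [hr, hr']
      exact congrArg some (le_antisymm (hmin a' ha') (hmin' a ha))

lemma fib_lb : ∀ k : Nat, k + 1 ≤ Nat.fib (k+2)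
  | 0 => by decide
  | 1 => by decide
  | (k+2) => by
      have h1 := fib_lb k
      have h2 := fib_lb (k+1)
      have h3 : Nat.fib (k+2+2) = Nat.fib (k+2) + Nat.fib (k+2+1) := Nat.fib_add_two
      have h4 : Nat.fib (k+2+1) = Nat.fib (k+1+2) := rfl
      omega

lemma fibLoopA_sound {t : Int} : ∀ (n : Nat) (x y : Int),
    fibLoopA t n x y = true → Hit t x y := by
  intro n
  induction n with
  | zero => intro x y h; simp [fibLoopA] at h
  | succ n ih =>
    intro x y h
    simp only [fibLoopA] at h
    split_ifs at h with h1 h2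
    · exact ⟨0, by simp [Nat.fib_zero, Nat.fib_one, h2]⟩
    · obtain ⟨k, hk⟩ := ih y (y + x) h
      refine ⟨k + 1, ?_⟩
      have hfib : ((Nat.fib (k+2) : Nat) : Int) = (Nat.fib k : Int) + (Nat.fib (k+1) : Int) := by
        exact_mod_cast Nat.fib_add_two
      have h5 : ((Nat.fib (k+1+1) : Nat) : Int) = ((Nat.fib (k+2) : Nat) : Int) := rfl
      rw [h5]
      linear_combination hk + y * hfib

lemma fibLoopA_complete {t : Int} : ∀ (k : Nat) (x y : Int) (n : Nat),
    1 ≤ x → x ≤ y → x * (Nat.fib k : Int) + y * (Nat.fib (k+1) : Int) = t → k < n →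
    fibLoopA t n x y = true := by
  intro k
  induction k with
  | zero =>
    intro x y n hx hxy heq hn
    simp only [Nat.fib_zero, Nat.fib_one, Nat.cast_zero, Nat.cast_one, mul_zero, mul_one,
      zero_add] at heq
    obtain ⟨n', rfl⟩ : ∃ n', n = n' + 1 := ⟨n - 1, by omega⟩
    simp [fibLoopA, heq]
  | succ k ih =>
    intro x y n hx hxy heq hn
    have hfk1 : (0:Int) ≤ (Nat.fib (k+1) : Int) := by positivity
    have hfk2 : (1:Int) ≤ (Nat.fib (k+1+1) : Int) := by
      exact_mod_cast Nat.succ_le_of_lt (Nat.fib_pos.mpr (by omega))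
    have hy1 : (1:Int) ≤ y := le_trans hx hxy
    have hyt : y ≤ t := by nlinarith [heq]
    obtain ⟨n', rfl⟩ : ∃ n', n = n' + 1 := ⟨n - 1, by omega⟩
    simp only [fibLoopA]
    rw [if_pos hyt]
    by_cases hyeq : y = t
    · rw [if_pos hyeq]
    · rw [if_neg hyeq]
      apply ih y (y + x) n' hy1 (by omega) _ (by omega)
      have hfib : ((Nat.fib (k+2) : Nat) : Int) = (Nat.fib k : Int) + (Nat.fib (k+1) : Int) := by
        exact_mod_cast Nat.fib_add_two
      have h5 : ((Nat.fib (k+1+1) : Nat) : Int) = ((Nat.fib (k+2) : Nat) : Int) := rfl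
      rw [h5] at heq
      linear_combination heq - y * hfib

lemma hit_k_bound {t x y : Int} (hx : 1 ≤ x) (hy : 1 ≤ y) {k : Nat}
    (heq : x * (Nat.fib k : Int) + y * (Nat.fib (k+1) : Int) = t) : k < t.toNat + 2 := by
  have hfib : ((Nat.fib (k+2) : Nat) : Int) = (Nat.fib k : Int) + (Nat.fib (k+1) : Int) := by
    exact_mod_cast Nat.fib_add_two
  have h0 : (0:Int) ≤ (Nat.fib k : Int) := by positivity
  have h0' : (0:Int) ≤ (Nat.fib (k+1) : Int) := by positivity
  have h1 : ((Nat.fib (k+2) : Nat) : Int) ≤ t := by nlinarith [heq]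
  have h2 : ((k:Int) + 1) ≤ ((Nat.fib (k+2) : Nat) : Int) := by exact_mod_cast fib_lb k
  omega

lemma hitA_iff {t x y : Int} (hx : 1 ≤ x) (hxy : x ≤ y) :
    fibLoopA t (t.toNat + 2) x y = true ↔ Hit t x y := by
  constructor
  · exact fibLoopA_sound _ x y
  · rintro ⟨k, hk⟩
    exact fibLoopA_complete k x y _ hx hxy hk (hit_k_bound hx (le_trans hx hxy) hk)

-- findSome? with (if p a then some (g a) else none) factors through the Int-valued search
lemma findSome?_if_map {l : List Int} {p : Int → Bool} {g : Int → List Int} :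
    l.findSome? (fun a => if p a then some (g a) else none)
      = (l.findSome? (fun a => if p a then some a else none)).map g := by
  induction l with
  | nil => rfl
  | cons a l ih =>
    simp only [List.findSome?]
    by_cases h : p a <;> simp [h, ih]

-- the first hit of an ascending integer range is the minimum of the hits
lemma findSome?_range_min (p : Int → Bool) (lo hi : Int) :
    IsMinOpt ((PySem.List.pyRange lo hi).findSome? (fun a => if p a then some a else none))
      (fun a => lo ≤ a ∧ a < hi ∧ p a = true) := by
  by_cases hlt : lo < hi
  · rw [PySem.List.pyRange_one_cons hlt]
    simp only [List.findSome?]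
    by_cases hp : p lo
    · rw [hp]
      exact Or.inr ⟨lo, rfl, ⟨le_refl _, hlt, hp⟩, fun a' ha' => ha'.1⟩
    · simp only [hp]
      refine isMinOpt_congr (fun a => ?_) (findSome?_range_min p (lo+1) hi)
      constructor
      · rintro ⟨h1, h2, h3⟩; exact ⟨by omega, h2, h3⟩
      · rintro ⟨h1, h2, h3⟩
        refine ⟨?_, h2, h3⟩
        rcases eq_or_lt_of_le h1 with rfl | h
        · rw [h3] at hp; exact absurd rfl hp
        · omega
  · rw [PySem.List.pyRange_one_eq_nil (by omega)]
    exact Or.inl ⟨rfl, fun a ⟨h1, h2, _⟩ => by omega⟩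
termination_by (hi - lo).toNat
decreasing_by omega

-- the valid starting values a contributed by Fibonacci index j for total sum s
def CandP (t s : Int) (j : Nat) (a : Int) : Prop :=
  s * (Nat.fib (j+2) : Int) - t = a * (Nat.fib j : Int) ∧
  (Nat.fib j : Int) ≤ s * (Nat.fib (j+2) : Int) - t ∧
  a * 2 ≤ s

-- B's per-sum predicate: a is produced by some admissible Fibonacci index
def PB (t s a : Int) : Prop :=
  ∃ j : Nat, 1 ≤ j ∧ (Nat.fib (j+2) : Int) ≤ t ∧ CandP t s j a

-- one step of B's best-update keeps the minimum
lemma best_step {t s : Int} {j : Nat} (hj : 1 ≤ j) {best : Option Int} {Q : Int → Prop}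
    (hb : IsMinOpt best Q) :
    IsMinOpt
      (if (s * (Nat.fib (j+2) : Int) - t) ≥ (Nat.fib j : Int) ∧
          PySem.Int.mod (s * (Nat.fib (j+2) : Int) - t) (Nat.fib j : Int) = 0 then
        if (PySem.Int.floordiv (s * (Nat.fib (j+2) : Int) - t) (Nat.fib j : Int)) * 2 ≤ s ∧
            (∀ b ∈ best, PySem.Int.floordiv (s * (Nat.fib (j+2) : Int) - t) (Nat.fib j : Int) < b)
          then some (PySem.Int.floordiv (s * (Nat.fib (j+2) : Int) - t) (Nat.fib j : Int))
          else best
       else best)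
      (fun a => Q a ∨ CandP t s j a) := by
  have hf0 : (0:Int) < (Nat.fib j : Int) := by exact_mod_cast Nat.fib_pos.mpr (by omega)
  set num := s * (Nat.fib (j+2) : Int) - t with hnum
  by_cases hc : num ≥ (Nat.fib j : Int) ∧ PySem.Int.mod num (Nat.fib j : Int) = 0
  · rw [if_pos hc]
    obtain ⟨hge, hmod⟩ := hc
    obtain ⟨a, ha⟩ := (PySem.Int.mod_eq_zero_iff_dvd _ _).1 hmod
    have hfd : PySem.Int.floordiv num (Nat.fib j : Int) = a := by
      rw [PySem.Int.floordiv_eq_ediv_of_pos hf0, ha, Int.mul_ediv_cancel_left _ (by omega)]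
    rw [hfd]
    have hcand : ∀ a', CandP t s j a' ↔ (a' = a ∧ a * 2 ≤ s) := by
      intro a'
      constructor
      · rintro ⟨h1, _, h3⟩
        rw [← hnum] at h1
        have heq : a' = a :=
          mul_left_cancel₀ (ne_of_gt hf0) (by linear_combination h1.symm + ha)
        subst heq
        exact ⟨rfl, h3⟩
      · rintro ⟨rfl, h2⟩
        refine ⟨?_, ?_, h2⟩
        · rw [← hnum, ha]; ring
        · rw [← hnum]; exact hge
    by_cases h2s : a * 2 ≤ s
    · -- the candidate set contributed at j is exactly {a}
      have hstep : IsMinOpt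
          (if a * 2 ≤ s ∧ (∀ b ∈ best, a < b) then some a else best)
          (fun a' => Q a' ∨ a' = a) := by
        rcases hb with ⟨hbn, hQe⟩ | ⟨m, hbm, hQm, hmin⟩
        · subst hbn
          rw [if_pos ⟨h2s, by intro b hb; simp at hb⟩]
          refine Or.inr ⟨a, rfl, Or.inr rfl, ?_⟩
          rintro a' (h | rfl)
          · exact absurd h (hQe a')
          · exact le_refl _
        · subst hbm
          by_cases hlt : a < m
          · rw [if_pos ⟨h2s, by intro b hb; simp at hb; omega⟩]
            refine Or.inr ⟨a, rfl, Or.inr rfl, ?_⟩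
            rintro a' (h | rfl)
            · exact le_trans (le_of_lt hlt) (hmin a' h)
            · exact le_refl _
          · rw [if_neg (by rintro ⟨_, hall⟩; exact hlt (hall m (by simp)))]
            refine Or.inr ⟨m, rfl, Or.inl hQm, ?_⟩
            rintro a' (h | rfl)
            · exact hmin a' h
            · omega
      refine isMinOpt_congr (fun a' => ?_) hstep
      rw [hcand a']
      tauto
    · -- candidate fails the a*2 ≤ s test: nothing added
      rw [if_neg (by rintro ⟨h, _⟩; exact h2s h)]
      refine isMinOpt_congr (fun a' => ?_) hb
      constructor
      · exact Or.inl
      · rintro (h | h)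
        · exact h
        · rw [hcand a'] at h; exact absurd h.2 (h.1 ▸ h2s)
  · rw [if_neg hc]
    have hnone : ∀ a', ¬ CandP t s j a' := by
      rintro a' ⟨h1, h2, _⟩
      apply hc
      refine ⟨by rw [hnum]; exact h2, ?_⟩
      rw [PySem.Int.mod_eq_zero_iff_dvd]
      exact ⟨a', by linear_combination h1⟩
    refine isMinOpt_congr (fun a' => ?_) hb
    constructor
    · exact Or.inl
    · rintro (h | h)
      · exact h
      · exact absurd h (hnone a')

lemma bestLoopB_char {t s : Int} : ∀ (n : Nat) (j : Nat) (best : Option Int) (Q : Int → Prop),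
    1 ≤ j → t < (Nat.fib (j + n + 2) : Int) → IsMinOpt best Q →
    IsMinOpt (bestLoopB t s n (Nat.fib j : Int) (Nat.fib (j+1) : Int) (Nat.fib (j+2) : Int) best)
      (fun a => Q a ∨ ∃ j' : Nat, j ≤ j' ∧ (Nat.fib (j'+2) : Int) ≤ t ∧ CandP t s j' a) := by
  intro n
  induction n with
  | zero =>
    intro j best Q hj hfuel hb
    simp only [bestLoopB]
    refine isMinOpt_congr (fun a => ?_) hb
    constructor
    · exact Or.inl
    · rintro (h | ⟨j', hj', hle, _⟩)
      · exact h
      · exfalso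
        have : (Nat.fib (j + 0 + 2) : Int) ≤ (Nat.fib (j' + 2) : Int) := by
          exact_mod_cast Nat.fib_mono (by omega)
        omega
  | succ n ih =>
    intro j best Q hj hfuel hb
    simp only [bestLoopB]
    by_cases hle : (Nat.fib (j+2) : Int) ≤ t
    · rw [if_pos hle]
      have hstep := best_step (t := t) (s := s) hj hb
      have hfib3 : (Nat.fib (j+1) : Int) + (Nat.fib (j+2) : Int) = (Nat.fib (j+1+2) : Int) := by
        have : Nat.fib (j+1+2) = Nat.fib (j+1) + Nat.fib (j+1+1) := Nat.fib_add_two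
        push_cast [this]
        ring
    
      rw [hfib3]
      have hmain := ih (j+1) _ (fun a => Q a ∨ CandP t s j a) (by omega)
        (by have : j+1+n+2 = j+(n+1)+2 := by omega
            rw [this]; exact hfuel) hstep
      refine isMinOpt_congr (fun a => ?_) hmain
      constructor
      · rintro ((h | h) | ⟨j', hj', h1, h2⟩)
        · exact Or.inl h
        · exact Or.inr ⟨j, le_refl _, hle, h⟩
        · exact Or.inr ⟨j', by omega, h1, h2⟩
      · rintro (h | ⟨j', hj', h1, h2⟩)
        · exact Or.inl (Or.inl h)
        · rcases eq_or_lt_of_le hj' with rfl | hlt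
          · exact Or.inl (Or.inr h2)
          · exact Or.inr ⟨j', by omega, h1, h2⟩
    · rw [if_neg hle]
      refine isMinOpt_congr (fun a => ?_) hb
      constructor
      · exact Or.inl
      · rintro (h | ⟨j', hj', h1, _⟩)
        · exact h
        · exfalso
          have : (Nat.fib (j+2) : Int) ≤ (Nat.fib (j'+2) : Int) := by
            exact_mod_cast Nat.fib_mono (by omega)
          omega

-- the two per-sum predicates agree for 2 ≤ s < t
lemma PA_iff_PB {t s a : Int} (hs2 : 2 ≤ s) (hst : s < t) :
    (1 ≤ a ∧ a < PySem.Int.floordiv s 2 + 1 ∧ Hit t a (s - a)) ↔ PB t s a := by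
  have hdiv : PySem.Int.floordiv s 2 = s / 2 := PySem.Int.floordiv_eq_ediv_of_pos (by omega)
  constructor
  · rintro ⟨ha1, ha2, k, hk⟩
    rw [hdiv] at ha2
    have h2a : a * 2 ≤ s := by omega
    match k, hk with
    | 0, hk =>
      exfalso
      simp only [Nat.fib_zero, Nat.fib_one, Nat.cast_zero, Nat.cast_one, mul_zero, mul_one,
        zero_add] at hk
      omega
    | 1, hk =>
      exfalso
      have hf1 : ((Nat.fib 1 : Nat) : Int) = 1 := by decide
      have hf2 : ((Nat.fib 2 : Nat) : Int) = 1 := by decide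
      rw [hf1, hf2] at hk
      omega
    | (j+2), hk =>
      have hF1 : (0:Int) ≤ (Nat.fib (j+1) : Int) := by positivity
      have hF2 : (0:Int) ≤ (Nat.fib (j+2) : Int) := by positivity
      have hF3 : (0:Int) ≤ (Nat.fib (j+2+1) : Int) := by positivity
      have hfib : ((Nat.fib (j+2+1) : Nat) : Int)
          = (Nat.fib (j+1) : Int) + (Nat.fib (j+1+1) : Int) := by
        exact_mod_cast (Nat.fib_add_two (n := j+1))
      have heqn : s * (Nat.fib ((j+1)+2) : Int) - t = a * (Nat.fib (j+1) : Int) := by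
        have h5 : ((Nat.fib ((j+1)+2) : Nat) : Int) = ((Nat.fib (j+2+1) : Nat) : Int) := rfl
        rw [h5]
        linear_combination hk + a * hfib
      refine ⟨j+1, by omega, ?_, heqn, ?_, h2a⟩
      · -- fib ((j+1)+2) ≤ t
        have h5 : ((Nat.fib ((j+1)+2) : Nat) : Int) = ((Nat.fib (j+2+1) : Nat) : Int) := rfl
        rw [h5]
        nlinarith [hk]
      · -- num ≥ fib (j+1)
        rw [heqn]
        nlinarith [hF1]
  · rintro ⟨j, hj, hle, heq, hge, h2a⟩
    have hf0 : (0:Int) < (Nat.fib j : Int) := by exact_mod_cast Nat.fib_pos.mpr (by omega)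
    have ha1 : 1 ≤ a := by nlinarith [heq, hge]
    refine ⟨ha1, by rw [hdiv]; omega, j+1, ?_⟩
    have hfib : ((Nat.fib (j+2) : Nat) : Int) = (Nat.fib j : Int) + (Nat.fib (j+1) : Int) := by
      exact_mod_cast Nat.fib_add_two
    have h5 : ((Nat.fib (j+1+1) : Nat) : Int) = ((Nat.fib (j+2) : Nat) : Int) := rfl
    rw [h5]
    linear_combination heq - a * hfib

lemma inner_eq {t s : Int} (hs2 : 2 ≤ s) (hst : s < t) : innerA t s = innerB t s := by
  have hdiv : PySem.Int.floordiv s 2 = s / 2 := PySem.Int.floordiv_eq_ediv_of_pos (by omega)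
  -- A's inner loop computes the minimum of PB
  have hA : IsMinOpt
      ((PySem.List.pyRange 1 (PySem.Int.floordiv s 2 + 1)).findSome?
        (fun a => if fibLoopA t (t.toNat + 2) a (s - a) then some a else none))
      (PB t s) := by
    refine isMinOpt_congr (fun a => ?_) (findSome?_range_min
      (fun a => fibLoopA t (t.toNat + 2) a (s - a)) 1 (PySem.Int.floordiv s 2 + 1))
    rw [← PA_iff_PB hs2 hst]
    constructor
    · rintro ⟨h1, h2, h3⟩
      exact ⟨h1, h2, (hitA_iff h1 (by rw [hdiv] at h2; omega)).1 h3⟩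
    · rintro ⟨h1, h2, h3⟩
      exact ⟨h1, h2, (hitA_iff h1 (by rw [hdiv] at h2; omega)).2 h3⟩
  -- B's inner loop computes the minimum of PB
  have hB : IsMinOpt (bestLoopB t s (t.toNat + 2) 1 1 2 none) (PB t s) := by
    have hfuel : t < (Nat.fib (1 + (t.toNat + 2) + 2) : Int) := by
      have h1 := fib_lb (t.toNat + 3)
      have h2 : t.toNat + 3 + 2 = 1 + (t.toNat + 2) + 2 := by omega
      rw [h2] at h1
      have h3 : ((t.toNat + 3 + 1 : Nat) : Int) ≤ (Nat.fib (1 + (t.toNat + 2) + 2) : Int) := by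
        exact_mod_cast h1
      push_cast at h3
      omega
    have h0 := bestLoopB_char (t := t) (s := s) (t.toNat + 2) 1 none (fun _ => False)
      (le_refl 1) hfuel (Or.inl ⟨rfl, fun _ h => h⟩)
    have e1 : ((Nat.fib 1 : Nat) : Int) = 1 := by decide
    have e2 : ((Nat.fib (1+1) : Nat) : Int) = 1 := by decide
    have e3 : ((Nat.fib (1+2) : Nat) : Int) = 2 := by decide
    rw [e1, e2, e3] at h0
    refine isMinOpt_congr (fun a => ?_) h0
    unfold PB
    tauto
  have heq := isMinOpt_unique hA hB
  unfold innerA innerB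
  rw [findSome?_if_map, heq]
  cases bestLoopB t s (t.toNat + 2) 1 1 2 none <;> rfl

lemma findSome?_congr_mem {l : List Int} {f g : Int → Option (List Int)}
    (h : ∀ a ∈ l, f a = g a) : l.findSome? f = l.findSome? g := by
  induction l with
  | nil => rfl
  | cons a l ih =>
    simp only [List.findSome?, h a (by simp)]
    cases g a
    · exact ih (fun x hx => h x (by simp [hx]))
    · rfl

-- ===== VERDICT (by name: the statement is the Claim_ definition above) =====
theorem find_fibonacci_starting_pair_spec : Claim_equal_find_fibonacci_starting_pair := by
  intro t _
  unfold Spec_find_fibonacci_starting_pair find_fibonacci_starting_pair find_fibonacci_starting_pair_alt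
  apply findSome?_congr_mem
  intro s hs
  rw [PySem.List.mem_pyRange_one] at hs
  exact inner_eq hs.1 hs.2
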